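-- pv_equiv track=rewrite | github.com/Cenrax/contextmd | src/contextmd/adapters/openai.py | get_context_window_size
-- ===== SOURCE A (Python) =====
-- MODEL_CONTEXT_WINDOWS = {
--     # GPT-5.x family (latest flagship models)
--     "gpt-5.2": 400000,
--     "gpt-5.2-pro": 400000,
--     "gpt-5.1": 400000,
--     "gpt-5": 400000,
--     "gpt-5-mini": 400000,
--     "gpt-5-nano": 400000,
--     "gpt-5.2-chat": 128000,
--     "gpt-5.1-codex": 400000,
--     "gpt-5.1-codex-mini": 400000,
--     # GPT-4.1 family
--     "gpt-4.1": 1047576,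
--     "gpt-4.1-mini": 1047576,
--     "gpt-4.1-nano": 1047576,
--     # GPT-4o family (multimodal)
--     "gpt-4o": 128000,
--     "gpt-4o-mini": 128000,
--     # o-series reasoning models
--     "o1": 200000,
--     "o1-mini": 128000,
--     "o1-preview": 128000,
--     "o3": 200000,
--     "o3-mini": 200000,
--     "o3-pro": 200000,
--     "o4-mini": 200000,
-- }
--
-- def get_context_window_size(model: str) -> int:
--     """Get context window size for an OpenAI model."""
--     if model in MODEL_CONTEXT_WINDOWS:
--         return MODEL_CONTEXT_WINDOWS[model]
--     sorted_prefixes = sorted(MODEL_CONTEXT_WINDOWS.keys(), key=len, reverse=True)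
--     for model_prefix in sorted_prefixes:
--         if model.startswith(model_prefix):
--             return MODEL_CONTEXT_WINDOWS[model_prefix]
--     return 128000
-- ===== SOURCE B (Python) =====
-- MODEL_CONTEXT_WINDOWS = {
--     "gpt-5.2": 400000,
--     "gpt-5.2-pro": 400000,
--     "gpt-5.1": 400000,
--     "gpt-5": 400000,
--     "gpt-5-mini": 400000,
--     "gpt-5-nano": 400000,
--     "gpt-5.2-chat": 128000,
--     "gpt-5.1-codex": 400000,
--     "gpt-5.1-codex-mini": 400000,
--     "gpt-4.1": 1047576,
--     "gpt-4.1-mini": 1047576,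
--     "gpt-4.1-nano": 1047576,
--     "gpt-4o": 128000,
--     "gpt-4o-mini": 128000,
--     "o1": 200000,
--     "o1-mini": 128000,
--     "o1-preview": 128000,
--     "o3": 200000,
--     "o3-mini": 200000,
--     "o3-pro": 200000,
--     "o4-mini": 200000,
-- }
--
-- _MAX_KEY_LEN = max(map(len, MODEL_CONTEXT_WINDOWS))
--
-- def get_context_window_size(model: str) -> int:
--     """Get context window size for an OpenAI model (longest matching prefix)."""
--     for i in range(min(len(model), _MAX_KEY_LEN), -1, -1):
--         prefix = model[:i]
--         if prefix in MODEL_CONTEXT_WINDOWS: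
--             return MODEL_CONTEXT_WINDOWS[prefix]
--     return 128000
-- ===== Notes on version B (the rewrite author's own statement) =====
-- stated objective: alternative
-- what changed: Instead of sorting all dict keys by length on every call and scanning them with startswith, B enumerates prefixes of the input from min(len(model), longest-key-length) down to 0 and returns the first one found by a dict lookup.
import Mathlib
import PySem

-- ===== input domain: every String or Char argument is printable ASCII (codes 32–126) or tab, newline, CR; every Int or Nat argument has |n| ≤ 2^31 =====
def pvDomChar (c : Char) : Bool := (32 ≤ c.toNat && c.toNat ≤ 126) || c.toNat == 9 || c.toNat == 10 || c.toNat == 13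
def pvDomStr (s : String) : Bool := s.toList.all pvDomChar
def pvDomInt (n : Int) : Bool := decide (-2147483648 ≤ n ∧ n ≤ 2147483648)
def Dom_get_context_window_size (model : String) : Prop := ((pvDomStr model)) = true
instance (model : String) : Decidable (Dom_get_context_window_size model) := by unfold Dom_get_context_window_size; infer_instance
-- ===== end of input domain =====

-- B replaces A's per-call sort of all keys and linear startswith scan by enumerating prefixes of the
-- input (from min(len(model), longest key length) down to 0) with a dict lookup each (alternative/simpler).

-- the module-level dict MODEL_CONTEXT_WINDOWS (insertion order, distinct keys)
def KVL : List (String × Int) := [ ("gpt-5.2", 400000), ("gpt-5.2-pro", 400000), ("gpt-5.1", 400000), ("gpt-5", 400000), ("gpt-5-mini", 400000), ("gpt-5-nano", 400000), ("gpt-5.2-chat", 128000), ("gpt-5.1-codex", 400000), ("gpt-5.1-codex-mini", 400000), ("gpt-4.1", 1047576), ("gpt-4.1-mini", 1047576), ("gpt-4.1-nano", 1047576), ("gpt-4o", 128000), ("gpt-4o-mini", 128000), ("o1", 200000), ("o1-mini", 128000), ("o1-preview", 128000), ("o3", 200000), ("o3-mini", 200000), ("o3-pro", 200000), ("o4-mini",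 200000) ]

def MCW : PySem.Dict String Int := PySem.Dict.mk KVL

-- ===== PORT A =====
-- 'for model_prefix in sorted_prefixes: if model.startswith(model_prefix): return D[model_prefix]; return 128000'
-- (every scanned prefix is a key of MCW, so Python's D[model_prefix] never raises; .getD 0 is that lookup)
def goA (model : String) : List String → Int
  | [] => 128000
  | p :: rest =>
    if PySem.Str.startswith model p then (PySem.Dict.get? MCW p).getD 0 else goA model rest

def get_context_window_size (model : String) : Int :=
  match PySem.Dict.get? MCW model with
  | some v => v
  | none =>
    goA model (PySem.List.sorted (PySem.Dict.keys MCW) (fun k => PySem.Str.len k) true)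

-- ===== PORT B =====
-- _MAX_KEY_LEN = max(map(len, MODEL_CONTEXT_WINDOWS))  (dict is nonempty, so Python's max returns; .getD 0 unreachable)
def maxKeyLen : Int :=
  ((PySem.List.max? ((PySem.Dict.keys MCW).map PySem.Str.len) (fun x => x)).getD 0)

-- 'for i in range(start, -1, -1): prefix = model[:i]; if prefix in D: return D[prefix]; return 128000'
def goB (model : String) : Nat → Int
  | 0 =>
    match PySem.Dict.get? MCW (PySem.Str.slice model none (some 0)) with
    | some v => v
    | none => 128000
  | i + 1 =>
    match PySem.Dict.get? MCW (PySem.Str.slice model none (some ((i : Int) + 1))) with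
    | some v => v
    | none => goB model i

def get_context_window_size_alt (model : String) : Int :=
  goB model (min (PySem.Str.len model) maxKeyLen).toNat

-- ===== PRECONDITION & SPEC =====
def Spec_get_context_window_size (model : String) (out : Int) : Prop := out = get_context_window_size_alt model
instance (model : String) (out : Int) : Decidable (Spec_get_context_window_size model out) := by unfold Spec_get_context_window_size; infer_instance

-- ===== CLAIM (what is proved, stated in full; the proofs are below) =====
def Claim_equal_get_context_window_size : Prop := ∀ (model : String), Dom_get_context_window_size model → Spec_get_context_window_size model (get_context_window_size model)

-- ===== LEMMAS AND PROOFS =====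

-- first-match association-list lookup on the char-list form of the keys
def lk : List (String × Int) → List Char → Option Int
  | [], _ => none
  | (k, v) :: t, w => if k.toList = w then some v else lk t w

-- A's scan, with the value carried alongside the scanned key
def chainP : List (String × Int) → String → Int
  | [], _ => 128000
  | (k, v) :: t, m => if PySem.Str.startswith m k then v else chainP t m

-- B's countdown loop, abstracted over the association list it looks up
def down (L : List (String × Int)) (s : List Char) : Nat → Int
  | 0 => match lk L (s.take 0) with | some v => v | none => 128000
  | i + 1 => match lk L (s.take (i + 1)) with | some v => v | none => down L s i

-- KVL reordered as Python's sorted(keys, key=len, reverse=True) lists the keys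
def SORTP : List (String × Int) := [ ("gpt-5.1-codex-mini", 400000), ("gpt-5.1-codex", 400000), ("gpt-5.2-chat", 128000), ("gpt-4.1-mini", 1047576), ("gpt-4.1-nano", 1047576), ("gpt-5.2-pro", 400000), ("gpt-4o-mini", 128000), ("gpt-5-mini", 400000), ("gpt-5-nano", 400000), ("o1-preview", 128000), ("gpt-5.2", 400000), ("gpt-5.1", 400000), ("gpt-4.1", 1047576), ("o1-mini", 128000), ("o3-mini", 200000), ("o4-mini", 200000), ("gpt-4o", 128000), ("o3-pro", 200000), ("gpt-5", 400000), ("o1", 200000), ("o3", 200000) ]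

theorem sortedLit :
    PySem.List.sorted (PySem.Dict.keys MCW) (fun k => PySem.Str.len k) true = SORTP.map (·.1) := by
  decide

theorem goA_eq_chain (m : String) : goA m (SORTP.map (·.1)) = chainP SORTP m := rfl

theorem get?_eq_lk (L : List (String × Int)) (w : String) :
    PySem.Dict.get? (PySem.Dict.mk L) w = lk L w.toList := by
  induction L with
  | nil => rfl
  | cons p t ih =>
    obtain ⟨k, v⟩ := p
    rw [PySem.Dict.get?_mk_cons, lk]
    by_cases h : k = w
    · simp [h]
    · have h' : ¬ k.toList = w.toList := fun hc => h (String.toList_inj.mp hc)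
      simp [h, h', ih]

theorem lk_perm_lit (w : List Char) : lk SORTP w = lk KVL w := by
  by_cases h0 : ("gpt-5.2").toList = w
  · subst h0; decide
  by_cases h1 : ("gpt-5.2-pro").toList = w
  · subst h1; decide
  by_cases h2 : ("gpt-5.1").toList = w
  · subst h2; decide
  by_cases h3 : ("gpt-5").toList = w
  · subst h3; decide
  by_cases h4 : ("gpt-5-mini").toList = w
  · subst h4; decide
  by_cases h5 : ("gpt-5-nano").toList = w
  · subst h5; decide
  by_cases h6 : ("gpt-5.2-chat").toList = w
  · subst h6; decide
  by_cases h7 : ("gpt-5.1-codex").toList = w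
  · subst h7; decide
  by_cases h8 : ("gpt-5.1-codex-mini").toList = w
  · subst h8; decide
  by_cases h9 : ("gpt-4.1").toList = w
  · subst h9; decide
  by_cases h10 : ("gpt-4.1-mini").toList = w
  · subst h10; decide
  by_cases h11 : ("gpt-4.1-nano").toList = w
  · subst h11; decide
  by_cases h12 : ("gpt-4o").toList = w
  · subst h12; decide
  by_cases h13 : ("gpt-4o-mini").toList = w
  · subst h13; decide
  by_cases h14 : ("o1").toList = w
  · subst h14; decide
  by_cases h15 : ("o1-mini").toList = w
  · subst h15; decide
  by_cases h16 : ("o1-preview").toList = w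
  · subst h16; decide
  by_cases h17 : ("o3").toList = w
  · subst h17; decide
  by_cases h18 : ("o3-mini").toList = w
  · subst h18; decide
  by_cases h19 : ("o3-pro").toList = w
  · subst h19; decide
  by_cases h20 : ("o4-mini").toList = w
  · subst h20; decide
  simp only [lk, SORTP, KVL, h0, h1, h2, h3, h4, h5, h6, h7, h8, h9, h10, h11, h12, h13, h14, h15, h16, h17, h18, h19, h20, if_false]

theorem down_congr (L L' : List (String × Int)) (h : ∀ w, lk L w = lk L' w) (s : List Char) :
    ∀ i, down L s i = down L' s i
  | 0 => by simp only [down, h]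
  | i + 1 => by simp only [down, h, down_congr L L' h s i]

theorem down_nil (s : List Char) : ∀ i, down [] s i = 128000
  | 0 => rfl
  | i + 1 => by simp only [down, lk, down_nil s i]

theorem lk_eq_none_of_longer (L : List (String × Int)) (w : List Char)
    (h : ∀ p ∈ L, p.1.toList.length < w.length) : lk L w = none := by
  induction L with
  | nil => rfl
  | cons p t ih =>
    obtain ⟨k, v⟩ := p
    have hk : k.toList.length < w.length := h (k, v) (by simp)
    rw [lk, if_neg (fun hc => by have := congrArg List.length hc; omega)]
    exact ih fun p hp => h p (List.mem_cons_of_mem _ hp)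

theorem down_hit (L : List (String × Int)) (s : List Char) (v : Int) (j : Nat)
    (hj : lk L (s.take j) = some v) :
    ∀ i, j ≤ i → (∀ j', j < j' → j' ≤ i → lk L (s.take j') = none) → down L s i = v
  | 0, hji, _ => by
    interval_cases j
    simp only [down, hj]
  | i + 1, hji, hnone => by
    by_cases hcase : j = i + 1
    · subst hcase; simp only [down, hj]
    · have hn : lk L (s.take (i + 1)) = none := hnone (i + 1) (by omega) (by omega)
      have := down_hit L s v j hj i (by omega) (fun j' h1 h2 => hnone j' h1 (by omega))
      simp only [down, hn, this]

theorem down_cons_skip (k : String) (v : Int) (t : List (String × Int)) (s : List Char)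
    (hk : ∀ j, k.toList ≠ s.take j) :
    ∀ i, down ((k, v) :: t) s i = down t s i
  | 0 => by simp only [down, lk, if_neg (hk 0)]
  | i + 1 => by simp only [down, lk, if_neg (hk (i + 1)), down_cons_skip k v t s hk i]

theorem chain_eq_down (L : List (String × Int)) (B : Nat)
    (hb : ∀ p ∈ L, p.1.toList.length ≤ B)
    (hs : L.Pairwise (fun a b => b.1.toList.length ≤ a.1.toList.length)) (m : String) :
    chainP L m = down L m.toList (min m.toList.length B) := by
  induction L with
  | nil => rw [down_nil]; rfl
  | cons p t ih =>
    obtain ⟨k, v⟩ := p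
    rw [List.pairwise_cons] at hs
    by_cases hpre : PySem.Str.startswith m k = true
    · rw [PySem.Str.startswith_eq, PySem.Chars.startswith_iff] at hpre
      have hlen : k.toList.length ≤ m.toList.length := hpre.length_le
      have hB : k.toList.length ≤ B := hb (k, v) (by simp)
      have htake : m.toList.take k.toList.length = k.toList :=
        (List.prefix_iff_eq_take.mp hpre).symm
      have hhit : lk ((k, v) :: t) (m.toList.take k.toList.length) = some v := by
        rw [lk, if_pos htake.symm]
      refine Eq.trans ?_ (down_hit _ _ v k.toList.length hhit _ (by omega) ?_).symm
      · rw [chainP, if_pos (by rw [PySem.Str.startswith_eq, PySem.Chars.startswith_iff]; exact hpre)]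
      · intro j' h1 h2
        apply lk_eq_none_of_longer
        intro p hp
        obtain ⟨pk, pv⟩ := p
        show pk.toList.length < (m.toList.take j').length
        have hjlen : (m.toList.take j').length = j' := by
          rw [List.length_take]; omega
        rcases List.mem_cons.mp hp with hh | hh
        · have : pk = k := congrArg Prod.fst hh
          subst this; omega
        · have : pk.toList.length ≤ k.toList.length := hs.1 (pk, pv) hh
          omega
    · have hk : ∀ j, k.toList ≠ m.toList.take j := by
        intro j hc
        exact hpre (by
          rw [PySem.Str.startswith_eq, PySem.Chars.startswith_iff, hc]
          exact List.take_prefix j m.toList)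
      rw [chainP, if_neg (by simpa using hpre), down_cons_skip k v t m.toList hk,
        ih (fun p hp => hb p (List.mem_cons_of_mem _ hp)) hs.2]

theorem lk_some_mem (L : List (String × Int)) (w : List Char) (v : Int)
    (h : lk L w = some v) : ∃ k, (k, v) ∈ L ∧ k.toList = w := by
  induction L with
  | nil => exact absurd h (by simp [lk])
  | cons p t ih =>
    obtain ⟨k0, v0⟩ := p
    rw [lk] at h
    split_ifs at h with hc
    · exact ⟨k0, by simp_all⟩
    · obtain ⟨k, hk1, hk2⟩ := ih h
      exact ⟨k, List.mem_cons_of_mem _ hk1, hk2⟩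

theorem maxKeyLen_eq : maxKeyLen = 18 := by decide

theorem goB_eq_down (m : String) : ∀ i, goB m i = down KVL m.toList i := by
  have hsl : ∀ i : Nat, (PySem.Str.slice m none (some (i : Int))).toList = m.toList.take i := by
    intro i
    rw [PySem.Str.toList_slice, PySem.Chars.slice_eq_listSlice,
      PySem.List.slice_to _ (by positivity)]
    simp
  intro i
  induction i with
  | zero =>
    rw [goB, down, get?_eq_lk]
    exact congrArg (fun o => match o with | some v => v | none => (128000 : Int))
      (congrArg (lk KVL) (by simpa using hsl 0))
  | succ i ih =>
    rw [goB, down, get?_eq_lk]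
    have : ((i : Int) + 1) = ((i + 1 : Nat) : Int) := by push_cast; ring
    rw [this, hsl (i + 1), ih]; rfl

-- ===== VERDICT (by name: the statement is the Claim_ definition above) =====
theorem get_context_window_size_spec : Claim_equal_get_context_window_size := by
  intro m _
  unfold Spec_get_context_window_size
  have haltstart : (min (PySem.Str.len m) maxKeyLen).toNat = min m.toList.length 18 := by
    rw [maxKeyLen_eq, PySem.Str.len_eq]; omega
  have halt : get_context_window_size_alt m = down KVL m.toList (min m.toList.length 18) := by
    rw [get_context_window_size_alt, haltstart, goB_eq_down]
  rw [get_context_window_size]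
  rcases h : PySem.Dict.get? MCW m with _ | v
  · rw [sortedLit, goA_eq_chain, halt,
      chain_eq_down SORTP 18 (by decide) (by decide) m]
    exact down_congr SORTP KVL lk_perm_lit m.toList _
  · have hlk : lk KVL m.toList = some v := by rw [← get?_eq_lk]; exact h
    obtain ⟨k, hkm, hkl⟩ := lk_some_mem KVL m.toList v hlk
    have hb : k.toList.length ≤ 18 := by
      have : ∀ p ∈ KVL, p.1.toList.length ≤ 18 := by decide
      exact this (k, v) hkm
    have hn : m.toList.length ≤ 18 := by rw [← hkl] at *; omega
    rw [halt, Nat.min_eq_left hn]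
    refine (down_hit KVL m.toList v m.toList.length ?_ _ le_rfl (fun j' h1 h2 => by omega)).symm
    rw [List.take_length]
    exact hlk
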